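-- pv_equiv track=rewrite | github.com/Ankitraut4/Voice-to-Insights-Pipeline-for-Air-Traffic-Operations | src/dashboard/app.py | combine_number_words
-- ===== SOURCE A (Python) =====
-- from typing import List, Dict, Any, Optional, Tuple
--
-- def words_to_digits(word: str) -> str:
--     """Convert spelled numbers to digits."""
--     mapping = {
--         'zero': '0', 'oh': '0', 'o': '0',
--         'one': '1', 'won': '1',
--         'two': '2', 'too': '2',
--         'three': '3', 'tree': '3',
--         'four': '4', 'fore': '4',
--         'five': '5', 'fife': '5',
--         'six': '6',
--         'seven': '7',
--         'eight': '8', 'ate': '8',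
--         'nine': '9', 'niner': '9'
--     }
--     return mapping.get(word, word)
--
-- def combine_number_words(tokens: List[str]) -> List[str]:
--     """Combine tens and ones words (e.g., 'twenty one' -> '21')."""
--     tens_map = {
--         "twenty": 20, "thirty": 30, "forty": 40, "fifty": 50,
--         "sixty": 60, "seventy": 70, "eighty": 80, "ninety": 90
--     }
--     result = []
--     i = 0
--     while i < len(tokens):
--         tok = tokens[i]
--         if tok in tens_map and i + 1 < len(tokens):
--             nxt = tokens[i + 1]
--             if nxt in ["one","two","three","four","five","six","seven","eight","nine"]:
--                 num = tens_map[tok] + int(words_to_digits(nxt))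
--                 result.append(str(num))
--                 i += 2
--                 continue
--         result.append(tok)
--         i += 1
--     return result
-- ===== SOURCE B (Python) =====
-- def combine_number_words(tokens):
--     """Combine tens and ones words (e.g., 'twenty one' -> '21')."""
--     tens_map = {
--         "twenty": 20, "thirty": 30, "forty": 40, "fifty": 50,
--         "sixty": 60, "seventy": 70, "eighty": 80, "ninety": 90
--     }
--     ones_map = {
--         "one": 1, "two": 2, "three": 3, "four": 4, "five": 5,
--         "six": 6, "seven": 7, "eight": 8, "nine": 9
--     }
--     result = []
--     pending = None  # an unresolved tens word waiting for a possible ones word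
--     for tok in tokens:
--         if pending is not None:
--             if tok in ones_map:
--                 result.append(str(tens_map[pending] + ones_map[tok]))
--                 pending = None
--                 continue
--             result.append(pending)
--             pending = None
--         if tok in tens_map:
--             pending = tok
--         else:
--             result.append(tok)
--     if pending is not None:
--         result.append(pending)
--     return result
-- ===== Notes on version B (the rewrite author's own statement) =====
-- stated objective: simpler
-- what changed: Replaces the index-based while loop with i+=2 lookahead skipping by a single for-loop over the tokens that carries an unresolved tens word in a 'pending' variable (flushed after the loop), and combines via a direct ones->int map instead of calling words_to_digits plus int().
import Mathlib
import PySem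

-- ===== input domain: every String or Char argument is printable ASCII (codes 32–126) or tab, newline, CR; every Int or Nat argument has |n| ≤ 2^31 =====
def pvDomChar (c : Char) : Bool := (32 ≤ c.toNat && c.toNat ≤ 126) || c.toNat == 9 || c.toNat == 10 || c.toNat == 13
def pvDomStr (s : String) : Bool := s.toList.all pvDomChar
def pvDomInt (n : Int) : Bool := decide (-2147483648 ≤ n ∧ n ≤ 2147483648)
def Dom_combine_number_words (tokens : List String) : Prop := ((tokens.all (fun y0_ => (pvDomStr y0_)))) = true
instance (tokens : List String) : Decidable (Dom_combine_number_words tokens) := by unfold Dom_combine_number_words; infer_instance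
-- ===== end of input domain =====

-- B replaces A's index-based while loop with i+=2 lookahead by a single pass carrying a
-- pending tens word (flushed after the loop); objective: simpler. The two agree on all inputs.

-- ===== PORT A =====
def words_to_digits (word : String) : String :=
  let mapping : PySem.Dict String String := PySem.Dict.ofList
    [("zero", "0"), ("oh", "0"), ("o", "0"),
     ("one", "1"), ("won", "1"),
     ("two", "2"), ("too", "2"),
     ("three", "3"), ("tree", "3"),
     ("four", "4"), ("fore", "4"),
     ("five", "5"), ("fife", "5"),
     ("six", "6"),
     ("seven", "7"),
     ("eight", "8"), ("ate", "8"),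
     ("nine", "9"), ("niner", "9")]
  mapping.getD word word

def pvTensMapA : PySem.Dict String Int := PySem.Dict.ofList
  [("twenty", 20), ("thirty", 30), ("forty", 40), ("fifty", 50),
   ("sixty", 60), ("seventy", 70), ("eighty", 80), ("ninety", 90)]

def pvOnesListA : List String :=
  ["one", "two", "three", "four", "five", "six", "seven", "eight", "nine"]

-- A's while-loop over index i, as structural recursion on the suffix tokens[i:]
def combine_number_words (tokens : List String) : List String :=
  match tokens with
  | [] => []
  | tok :: rest =>
    if pvTensMapA.contains tok ∧ rest ≠ [] then
      match _hr : rest with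
      | nxt :: rest2 =>
        if pvOnesListA.contains nxt then
          -- int(words_to_digits(nxt)) never raises here (nxt is a ones word), so getD 0 is exact
          PySem.Int.toStr (pvTensMapA.getD tok 0 + (PySem.Int.ofStr? (words_to_digits nxt)).getD 0)
            :: combine_number_words rest2
        else tok :: combine_number_words rest
      | [] => tok :: combine_number_words rest
    else tok :: combine_number_words rest
termination_by tokens.length
decreasing_by all_goals simp_all

-- ===== PORT B =====
def pvTensMapB : PySem.Dict String Int := PySem.Dict.ofList
  [("twenty", 20), ("thirty", 30), ("forty", 40), ("fifty", 50),
   ("sixty", 60), ("seventy", 70), ("eighty", 80), ("ninety", 90)]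

def pvOnesMapB : PySem.Dict String Int := PySem.Dict.ofList
  [("one", 1), ("two", 2), ("three", 3), ("four", 4), ("five", 5),
   ("six", 6), ("seven", 7), ("eight", 8), ("nine", 9)]

-- one iteration of B's for-loop body over the state (result, pending)
def pvStepB (st : List String × Option String) (tok : String) : List String × Option String :=
  match st.2 with
  | some p =>
    if pvOnesMapB.contains tok then
      (st.1 ++ [PySem.Int.toStr (pvTensMapB.getD p 0 + pvOnesMapB.getD tok 0)], none)
    else  -- flush pending, then fall through to the pending-free cases
      if pvTensMapB.contains tok then (st.1 ++ [p], some tok)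
      else (st.1 ++ [p] ++ [tok], none)
  | none =>
    if pvTensMapB.contains tok then (st.1, some tok)
    else (st.1 ++ [tok], none)

def combine_number_words_alt (tokens : List String) : List String :=
  let st := tokens.foldl pvStepB ([], none)
  match st.2 with
  | some p => st.1 ++ [p]
  | none => st.1

-- ===== PRECONDITION & SPEC =====
def Spec_combine_number_words (tokens : List String) (out : List String) : Prop := out = combine_number_words_alt tokens
instance (tokens : List String) (out : List String) : Decidable (Spec_combine_number_words tokens out) := by unfold Spec_combine_number_words; infer_instance

-- ===== CLAIM (what is proved, stated in full; the proofs are below) =====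
def Claim_equal_combine_number_words : Prop := ∀ (tokens : List String), Dom_combine_number_words tokens → Spec_combine_number_words tokens (combine_number_words tokens)

-- ===== LEMMAS AND PROOFS =====

def pvFlush (st : List String × Option String) : List String :=
  match st.2 with
  | some p => st.1 ++ [p]
  | none => st.1

def pvOptList : Option String → List String
  | some p => [p]
  | none => []

-- B's two dicts test/value the same words as A's dict and ones list
theorem pv_tens_eq : pvTensMapB = pvTensMapA := by decide

theorem pv_ones_contains_eq (n : String) :
    pvOnesMapB.contains n = pvOnesListA.contains n := by
  have h : pvOnesMapB = PySem.Dict.mk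
      [("one", 1), ("two", 2), ("three", 3), ("four", 4), ("five", 5),
       ("six", 6), ("seven", 7), ("eight", 8), ("nine", 9)] := by decide
  rw [h]
  simp [pvOnesListA, beq_eq_decide, eq_comm]

-- the combined values agree: A's toStr(tens + int(words_to_digits nxt)) = B's toStr(tens + ones nxt)
theorem pv_combined_eq (t n : String) (hn : n ∈ pvOnesListA) :
    PySem.Int.toStr (pvTensMapA.getD t 0 + (PySem.Int.ofStr? (words_to_digits n)).getD 0)
      = PySem.Int.toStr (pvTensMapB.getD t 0 + pvOnesMapB.getD n 0) := by
  rw [pv_tens_eq]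
  fin_cases hn <;> rfl

-- unfolding lemmas for A's well-founded recursion
theorem pvA_nil : combine_number_words [] = [] := by
  simp [combine_number_words]

theorem pvA_single (t : String) : combine_number_words [t] = [t] := by
  simp [combine_number_words]

theorem pvA_not_tens (tok : String) (rest : List String)
    (ht : ¬ pvTensMapA.contains tok = true) :
    combine_number_words (tok :: rest) = tok :: combine_number_words rest := by
  cases rest with
  | nil => simp [combine_number_words]
  | cons a l => rw [combine_number_words]; simp [ht]

theorem pvA_tens_ones (p tok : String) (rest : List String)
    (hpt : pvTensMapA.contains p = true) (ho : tok ∈ pvOnesListA) :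
    combine_number_words (p :: tok :: rest)
      = PySem.Int.toStr (pvTensMapA.getD p 0 + (PySem.Int.ofStr? (words_to_digits tok)).getD 0)
          :: combine_number_words rest := by
  rw [combine_number_words]; simp [hpt, ho]

theorem pvA_tens_not_ones (p tok : String) (rest : List String)
    (hpt : pvTensMapA.contains p = true) (ho : tok ∉ pvOnesListA) :
    combine_number_words (p :: tok :: rest) = p :: combine_number_words (tok :: rest) := by
  rw [combine_number_words]; simp [hpt, ho]

-- main invariant: running B's loop from (out, pending) and flushing equals out ++ A's result
-- on the pending word (if any) prepended to the remaining tokens, for a tens-word pending.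
theorem pv_loop_eq (tokens : List String) : ∀ (out : List String) (pending : Option String),
    (∀ p, pending = some p → pvTensMapA.contains p = true) →
    pvFlush (tokens.foldl pvStepB (out, pending)) = out ++ combine_number_words (pvOptList pending ++ tokens) := by
  induction tokens with
  | nil =>
    intro out pending _
    cases pending with
    | none => simp [pvFlush, pvOptList, pvA_nil]
    | some p => simp [pvFlush, pvOptList, pvA_single]
  | cons tok rest ih =>
    intro out pending hp
    cases pending with
    | none =>
      simp only [pvOptList, List.nil_append, List.foldl_cons]
      by_cases ht : pvTensMapA.contains tok = true
      · rw [show pvStepB (out, none) tok = (out, some tok) by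
          simp [pvStepB, pv_tens_eq, ht]]
        rw [ih out (some tok) (by intro p hps; cases hps; exact ht)]
        rfl
      · rw [show pvStepB (out, none) tok = (out ++ [tok], none) by
          simp [pvStepB, pv_tens_eq, ht]]
        rw [ih (out ++ [tok]) none (by intro p hps; cases hps)]
        rw [pvA_not_tens tok rest ht]
        simp [pvOptList]
    | some p =>
      have hpt : pvTensMapA.contains p = true := hp p rfl
      simp only [pvOptList, List.singleton_append, List.foldl_cons]
      by_cases ho : tok ∈ pvOnesListA
      · rw [show pvStepB (out, some p) tok
              = (out ++ [PySem.Int.toStr (pvTensMapB.getD p 0 + pvOnesMapB.getD tok 0)], none) by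
            simp [pvStepB, pv_ones_contains_eq, ho]]
        rw [ih _ none (by intro q hq; cases hq)]
        rw [pvA_tens_ones p tok rest hpt ho, pv_combined_eq p tok ho]
        simp [pvOptList]
      · by_cases ht : pvTensMapA.contains tok = true
        · rw [show pvStepB (out, some p) tok = (out ++ [p], some tok) by
            simp [pvStepB, pv_ones_contains_eq, ho, pv_tens_eq, ht]]
          rw [ih (out ++ [p]) (some tok) (by intro q hq; cases hq; exact ht)]
          rw [pvA_tens_not_ones p tok rest hpt ho]
          simp [pvOptList]
        · rw [show pvStepB (out, some p) tok = (out ++ [p] ++ [tok], none) by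
            simp [pvStepB, pv_ones_contains_eq, ho, pv_tens_eq, ht]]
          rw [ih (out ++ [p] ++ [tok]) none (by intro q hq; cases hq)]
          rw [pvA_tens_not_ones p tok rest hpt ho, pvA_not_tens tok rest ht]
          simp [pvOptList]

-- ===== VERDICT (by name: the statement is the Claim_ definition above) =====
theorem combine_number_words_spec : Claim_equal_combine_number_words := by
  intro tokens _
  unfold Spec_combine_number_words combine_number_words_alt
  have h := pv_loop_eq tokens [] none (by intro p hp; cases hp)
  simpa [pvFlush, pvOptList] using h.symm
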